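-- pv_equiv track=rewrite | github.com/IwoSzczepaniak/Wakacje_z_ASD | p1a/sol_zachlan_zly.py | length_of_the_longest_letter
-- ===== SOURCE A (Python) =====
-- def length_of_the_longest_letter(M, D, message):
--     if len(message) > 4:
--         r = 4
--     elif len(message) < 1:
--         return -1
--     else:
--         r = len(message)
--     code = message[0]
--     if len(message) > 1:
--         for i in range(1, r - 1):
--             code += message[i]
--
--     j = len(code)
--     while j > 0:
--         for i in range(len(D)):
--             if code == M[D[i]][1]:
--                 return j # j to długość wyrazu
--         code = code[:-1]
--         j -= 1
-- ===== SOURCE B (Python) =====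
-- def length_of_the_longest_letter(M, D, message):
--     # single pass keeping a running maximum of matching prefix lengths,
--     # with an early return on a full-code match (A's first pass also stops there)
--     if len(message) < 1:
--         return -1
--     code = message[:max(1, min(len(message), 4) - 1)]
--     best = 0
--     for i in range(len(D)):
--         word = M[D[i]][1]
--         if word == code:
--             return len(code)
--         if 0 < len(word) <= len(code) and code[:len(word)] == word:
--             best = max(best, len(word))
--     return best if best else None
-- ===== Notes on version B (the rewrite author's own statement) =====
-- stated objective: simpler
-- what changed: B computes the capped prefix by one slice and makes a single pass over the dictionary keeping a running maximum of matching prefix lengths (returning immediately on a full-code match, where A's first pass also stops), instead of A's shrink-the-prefix outer loop that rescans the whole dictionary at every length.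
-- outside the precondition, e.g. on length_of_the_longest_letter([['x', 'ab']], [0], 'zzzz'): A returns None, B returns None
import Mathlib
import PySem

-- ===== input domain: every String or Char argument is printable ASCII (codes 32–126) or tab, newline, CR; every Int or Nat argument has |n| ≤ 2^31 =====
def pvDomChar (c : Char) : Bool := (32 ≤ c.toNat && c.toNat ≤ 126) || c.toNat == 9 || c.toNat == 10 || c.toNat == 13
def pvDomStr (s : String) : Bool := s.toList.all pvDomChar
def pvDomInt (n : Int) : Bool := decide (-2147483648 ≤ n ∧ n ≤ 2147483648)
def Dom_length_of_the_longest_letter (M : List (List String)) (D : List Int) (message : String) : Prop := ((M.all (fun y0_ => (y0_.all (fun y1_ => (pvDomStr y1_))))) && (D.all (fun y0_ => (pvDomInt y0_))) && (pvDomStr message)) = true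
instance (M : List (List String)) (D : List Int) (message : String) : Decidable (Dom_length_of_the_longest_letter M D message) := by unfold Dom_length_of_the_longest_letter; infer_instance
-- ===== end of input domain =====

-- B replaces A's shrink-the-prefix loop (which rescans the dictionary at every length and
-- early-returns) by one slice plus a single pass keeping a running maximum, returning
-- immediately on a full-code match (where A's first pass also stops); objective: simpler.

-- ===== PORT A =====

-- inner 'for i in range(len(D)): if code == M[D[i]][1]: return j'
-- some true = a match was found; some false = no match; none = IndexError (M[D[i]] or [1] out of range)
def scanA (M : List (List String)) (code : List Char) : List Int → Option Bool
  | [] => some false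
  | d :: rest =>
    match PySem.List.pyGet? M d with
    | none => none
    | some row =>
      match PySem.List.pyGet? row 1 with
      | none => none
      | some w => if w.toList = code then some true else scanA M code rest

-- 'while j > 0: … code = code[:-1]; j -= 1'; j is the fuel.
-- sentinel -2 = Python's implicit 'return None' (fall-through), -3 = an exception; both outside Pre_.
def loopA (M : List (List String)) (D : List Int) : Nat → List Char → Int
  | 0, _ => -2
  | j + 1, code =>
    match scanA M code D with
    | none => -3
    | some true => ((j : Int) + 1)
    | some false => loopA M D j code.dropLast   -- code[:-1]

def length_of_the_longest_letter (M : List (List String)) (D : List Int) (message : String) : Int :=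
  let s := message.toList
  if 4 < s.length then
    -- r = 4; code = message[0] + message[1] + message[2]  (range(1,3))
    let code := (PySem.List.pyRange 1 3 1).foldl
      (fun c i => c ++ (PySem.List.pyGet? s i).toList) (PySem.List.pyGet? s 0).toList
    loopA M D code.length code
  else if s.length < 1 then -1
  else
    let r : Nat := s.length
    let code0 := (PySem.List.pyGet? s 0).toList
    let code := if 1 < s.length then
        (PySem.List.pyRange 1 ((r : Int) - 1) 1).foldl
          (fun c i => c ++ (PySem.List.pyGet? s i).toList) code0
      else code0
    loopA M D code.length code

-- ===== PORT B =====

-- single pass: 'word = M[D[i]][1]; if word == code: return len(code);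
-- if 0 < len(word) <= len(code) and code[:len(word)] == word: best = max(best, len(word))';
-- none = an exception while indexing.
def loopB (M : List (List String)) (code : List Char) : List Int → Int → Option Int
  | [], best => some best
  | d :: rest, best =>
    match PySem.List.pyGet? M d with
    | none => none
    | some row =>
      match PySem.List.pyGet? row 1 with
      | none => none
      | some w =>
        let wl := w.toList
        if wl = code then some (code.length : Int)     -- 'return len(code)'
        else loopB M code rest
          (if 0 < wl.length ∧ wl.length ≤ code.length ∧ code.take wl.length = wl
           then max best (wl.length : Int) else best)

def length_of_the_longest_letter_alt (M : List (List String)) (D : List Int) (message : String) : Int :=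
  let s := message.toList
  if s.length < 1 then -1
  else
    let code := s.take (max 1 (min s.length 4 - 1))   -- message[:max(1, min(len(message),4)-1)]
    match loopB M code D 0 with
    | none => -3                                      -- an exception; outside Pre_
    | some best => if best ≠ 0 then best else -2      -- 'best if best else None'; -2 = None, outside Pre_

-- ===== PRECONDITION & SPEC =====

-- the capped prefix both programs compare against (a function of the message only)
def codeOf (message : String) : List Char :=
  message.toList.take (max 1 (min message.toList.length 4 - 1))

-- the word stored at index d (meaningful when the entry is valid)
def wordAt (M : List (List String)) (d : Int) : List Char :=
  match PySem.List.pyGet? M d with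
  | none => []
  | some row =>
    match PySem.List.pyGet? row 1 with
    | none => []
    | some w => w.toList

-- d is a valid index into M and its row has at least the two fields Python reads
def entryOK (M : List (List String)) (d : Int) : Bool :=
  match PySem.List.pyGet? M d with
  | none => false
  | some row => decide (2 ≤ row.length)

-- Pre_ excludes (a) inputs on which A raises an IndexError — a malformed dictionary entry
-- (invalid index into M, or a row with < 2 fields) reached before any full-code match — and
-- (b) inputs with a nonempty message but no dictionary word matching a prefix of the capped
-- code, where A falls through and returns Python None, which is not an int. Inputs where A
-- returns an int (empty message; a full-code match whose scan never touches a malformed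
-- entry; a well-formed dictionary with some prefix match) are all inside Pre_.
def Pre_length_of_the_longest_letter (M : List (List String)) (D : List Int) (message : String) : Prop :=
  message.toList = [] ∨
  (∃ i, ∃ _ : i < D.length,
      (∀ k, k ≤ i → entryOK M (D.getD k 0) = true) ∧ wordAt M (D.getD i 0) = codeOf message) ∨
  ((∀ d ∈ D, entryOK M d = true) ∧
   (∃ d ∈ D, wordAt M d ≠ [] ∧ wordAt M d <+: codeOf message))

instance (M : List (List String)) (D : List Int) (message : String) : Decidable (Pre_length_of_the_longest_letter M D message) := by unfold Pre_length_of_the_longest_letter; infer_instance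

def pvWitness_length_of_the_longest_letter : List (List String) × List Int × String :=
  ([["a", "ab"], ["b", "x"]], [1, 0], "abcde")

def Spec_length_of_the_longest_letter (M : List (List String)) (D : List Int) (message : String) (out : Int) : Prop := out = length_of_the_longest_letter_alt M D message
instance (M : List (List String)) (D : List Int) (message : String) (out : Int) : Decidable (Spec_length_of_the_longest_letter M D message out) := by unfold Spec_length_of_the_longest_letter; infer_instance

-- ===== CLAIM (what is proved, stated in full; the proofs are below) =====
def Claim_equal_length_of_the_longest_letter : Prop := ∀ (M : List (List String)) (D : List Int) (message : String), Dom_length_of_the_longest_letter M D message → Pre_length_of_the_longest_letter M D message → Spec_length_of_the_longest_letter M D message (length_of_the_longest_letter M D message)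

-- ===== LEMMAS AND PROOFS =====

lemma entryOK_word {M : List (List String)} {d : Int} (h : entryOK M d = true) :
    ∃ row w, PySem.List.pyGet? M d = some row ∧ PySem.List.pyGet? row 1 = some w ∧
      w.toList = wordAt M d := by
  unfold entryOK at h
  match hrow : PySem.List.pyGet? M d with
  | none => rw [hrow] at h; simp at h
  | some row =>
    rw [hrow] at h
    have hlen : 2 ≤ row.length := by simpa using h
    have hw : PySem.List.pyGet? row 1 = some row[1] :=
      PySem.List.pyGet?_ofNat (xs := row) (n := 1) (by omega)
    exact ⟨row, row[1], rfl, hw, by simp [wordAt, hrow, hw]⟩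

-- the "max so far" fold with an explicit length cap j
def bestF (M : List (List String)) (code : List Char) (j : Nat) (D : List Int) (b : Int) : Int :=
  D.foldl (fun b d =>
    if wordAt M d ≠ [] ∧ (wordAt M d).length ≤ j ∧ code.take (wordAt M d).length = wordAt M d
    then max b ((wordAt M d).length : Int) else b) b

lemma bestF_cons (M : List (List String)) (code : List Char) (j : Nat) (d : Int) (D : List Int) (b : Int) :
    bestF M code j (d :: D) b = bestF M code j D
      (if wordAt M d ≠ [] ∧ (wordAt M d).length ≤ j ∧ code.take (wordAt M d).length = wordAt M d
       then max b ((wordAt M d).length : Int) else b) := rfl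

lemma bestF_le (M : List (List String)) (code : List Char) (j : Nat) :
    ∀ (D : List Int) (b : Int), b ≤ j → bestF M code j D b ≤ j := by
  intro D
  induction D with
  | nil => intro b hb; simpa [bestF] using hb
  | cons d rest ih =>
    intro b hb
    rw [bestF_cons]
    apply ih
    split_ifs with h
    · rcases h with ⟨_, hle, _⟩
      simp only [max_le_iff]
      exact ⟨hb, by exact_mod_cast hle⟩
    · exact hb

lemma bestF_ge (M : List (List String)) (code : List Char) (j : Nat) :
    ∀ (D : List Int) (b : Int), b ≤ bestF M code j D b := by
  intro D
  induction D with
  | nil => intro b; simp [bestF]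
  | cons d rest ih =>
    intro b
    rw [bestF_cons]
    refine le_trans ?_ (ih _)
    split_ifs <;> simp

-- if no entry matches at exactly length j+1, the cap j+1 collapses to cap j
lemma bestF_cap_drop (M : List (List String)) (code : List Char) (j : Nat) :
    ∀ (D : List Int) (b : Int),
      (∀ d ∈ D, ¬ (wordAt M d ≠ [] ∧ (wordAt M d).length = j + 1 ∧
                   code.take (wordAt M d).length = wordAt M d)) →
      bestF M code (j + 1) D b = bestF M code j D b := by
  intro D
  induction D with
  | nil => intro b _; rfl
  | cons d rest ih =>
    intro b hno
    rw [bestF_cons, bestF_cons]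
    have hd := hno d (by simp)
    have hrest : ∀ d' ∈ rest, ¬ _ := fun d' hd' => hno d' (by simp [hd'])
    have hacc : (if wordAt M d ≠ [] ∧ (wordAt M d).length ≤ j + 1 ∧ code.take (wordAt M d).length = wordAt M d
                 then max b ((wordAt M d).length : Int) else b)
              = (if wordAt M d ≠ [] ∧ (wordAt M d).length ≤ j ∧ code.take (wordAt M d).length = wordAt M d
                 then max b ((wordAt M d).length : Int) else b) := by
      by_cases h1 : wordAt M d ≠ [] ∧ (wordAt M d).length ≤ j + 1 ∧ code.take (wordAt M d).length = wordAt M d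
      · have hne : (wordAt M d).length ≠ j + 1 := by
          intro he; exact hd ⟨h1.1, he, h1.2.2⟩
        have hle : (wordAt M d).length ≤ j + 1 := h1.2.1
        rw [if_pos h1, if_pos ⟨h1.1, by omega, h1.2.2⟩]
      · rw [if_neg h1]
        by_cases h2 : wordAt M d ≠ [] ∧ (wordAt M d).length ≤ j ∧ code.take (wordAt M d).length = wordAt M d
        · exact absurd ⟨h2.1, by omega, h2.2.2⟩ h1
        · rw [if_neg h2]
    rw [hacc]
    exact ih _ hrest

-- if some entry matches at exactly length j+1, the fold reaches j+1
lemma bestF_cap_hit (M : List (List String)) (code : List Char) (j : Nat) :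
    ∀ (D : List Int) (b : Int), b ≤ (j : Int) + 1 →
      (∃ d ∈ D, wordAt M d ≠ [] ∧ (wordAt M d).length = j + 1 ∧
                code.take (wordAt M d).length = wordAt M d) →
      bestF M code (j + 1) D b = (j : Int) + 1 := by
  intro D
  induction D with
  | nil => intro b _ h; simp at h
  | cons d rest ih =>
    intro b hb hex
    rw [bestF_cons]
    by_cases hd : wordAt M d ≠ [] ∧ (wordAt M d).length = j + 1 ∧ code.take (wordAt M d).length = wordAt M d
    · have hcond : wordAt M d ≠ [] ∧ (wordAt M d).length ≤ j + 1 ∧ code.take (wordAt M d).length = wordAt M d :=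
        ⟨hd.1, by omega, hd.2.2⟩
      rw [if_pos hcond]
      have hlen : ((wordAt M d).length : Int) = (j : Int) + 1 := by exact_mod_cast congrArg (Nat.cast : Nat → Int) hd.2.1
      have hmax : max b ((wordAt M d).length : Int) = (j : Int) + 1 := by
        rw [hlen]; exact max_eq_right hb
      rw [hmax]
      have hle : bestF M code (j + 1) rest ((j : Int) + 1) ≤ ((j + 1 : Nat) : Int) := by
        apply bestF_le; push_cast; omega
      have hge := bestF_ge M code (j + 1) rest ((j : Int) + 1)
      push_cast at hle
      omega
    · rcases hex with ⟨d', hd', hprop⟩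
      rcases List.mem_cons.mp hd' with rfl | hmem
      · exact absurd hprop hd
      · have hacc : (if wordAt M d ≠ [] ∧ (wordAt M d).length ≤ j + 1 ∧ code.take (wordAt M d).length = wordAt M d
                     then max b ((wordAt M d).length : Int) else b) ≤ (j : Int) + 1 := by
          split_ifs with h1
          · rcases h1 with ⟨_, hle, _⟩
            simp only [max_le_iff]
            constructor
            · exact hb
            · exact_mod_cast Nat.cast_le.mpr hle |>.trans (by push_cast; omega)
          · exact hb
        exact ih _ hacc ⟨d', hmem, hprop⟩

-- the length-0 cap keeps the accumulator
lemma bestF_zero (M : List (List String)) (code : List Char) :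
    ∀ (D : List Int) (b : Int), bestF M code 0 D b = b := by
  intro D
  induction D with
  | nil => intro b; rfl
  | cons d rest ih =>
    intro b
    rw [bestF_cons]
    have : ¬ (wordAt M d ≠ [] ∧ (wordAt M d).length ≤ 0 ∧ code.take (wordAt M d).length = wordAt M d) := by
      rintro ⟨hne, hle, _⟩
      exact hne (List.eq_nil_of_length_eq_zero (by omega))
    rw [if_neg this]
    exact ih b

-- if some entry whose scan prefix is well-formed holds exactly the code, both A's inner
-- scan and B's single pass stop there: scanA reports a match and loopB returns len(code)
lemma early_match (M : List (List String)) (code : List Char) :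
    ∀ (D : List Int) (b : Int),
      (∃ i, ∃ _ : i < D.length,
          (∀ k, k ≤ i → entryOK M (D.getD k 0) = true) ∧ wordAt M (D.getD i 0) = code) →
      scanA M code D = some true ∧ loopB M code D b = some (code.length : Int) := by
  intro D
  induction D with
  | nil => intro b h; obtain ⟨i, hi, _⟩ := h; simp at hi
  | cons d rest ih =>
    intro b h
    obtain ⟨i, hi, hok, hm⟩ := h
    have h0 : entryOK M d = true := by
      have := hok 0 (Nat.zero_le i)
      simpa using this
    obtain ⟨row, w, hrow, hw, hwl⟩ := entryOK_word h0
    by_cases hdm : wordAt M d = code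
    · constructor
      · simp [scanA, hrow, hw, hwl, hdm]
      · simp [loopB, hrow, hw, hwl, hdm]
    · have hine : i ≠ 0 := by
        intro he
        apply hdm
        simpa [he] using hm
      obtain ⟨j, rfl⟩ := Nat.exists_eq_succ_of_ne_zero hine
      have hrest : ∃ i', ∃ _ : i' < rest.length,
          (∀ k, k ≤ i' → entryOK M (rest.getD k 0) = true) ∧ wordAt M (rest.getD i' 0) = code := by
        refine ⟨j, by simpa using hi, ?_, by simpa using hm⟩
        intro k hk
        have := hok (k + 1) (by omega)
        simpa using this
      have hne : w.toList ≠ code := by rw [hwl]; exact hdm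
      constructor
      · simp only [scanA, hrow, hw, if_neg hne]
        exact (ih 0 hrest).1
      · simp only [loopB, hrow, hw, if_neg hne]
        exact (ih (if 0 < w.toList.length ∧ w.toList.length ≤ code.length ∧ code.take w.toList.length = w.toList
           then max b (w.toList.length : Int) else b) hrest).2

-- B's loop, under valid entries and with no full-code match, is the capped fold at cap = len code
lemma loopB_eq_bestF (M : List (List String)) (code : List Char) :
    ∀ (D : List Int) (b : Int), (∀ d ∈ D, entryOK M d = true) →
      (∀ d ∈ D, wordAt M d ≠ code) →
      loopB M code D b = some (bestF M code code.length D b) := by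
  intro D
  induction D with
  | nil => intro b _ _; rfl
  | cons d rest ih =>
    intro b hok hno
    obtain ⟨row, w, hrow, hw, hwl⟩ := entryOK_word (hok d (by simp))
    have hne : w.toList ≠ code := by rw [hwl]; exact hno d (by simp)
    simp only [loopB, hrow, hw, if_neg hne]
    rw [bestF_cons]
    rw [ih _ (fun d' hd' => hok d' (by simp [hd'])) (fun d' hd' => hno d' (by simp [hd']))]
    congr 1
    rw [hwl]
    by_cases h : 0 < (wordAt M d).length ∧ (wordAt M d).length ≤ code.length ∧ code.take (wordAt M d).length = wordAt M d
    · rw [if_pos h, if_pos ⟨by rcases h with ⟨h0,_,_⟩; exact fun he => by simp [he] at h0, h.2.1, h.2.2⟩]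
    · rw [if_neg h]
      by_cases h2 : wordAt M d ≠ [] ∧ (wordAt M d).length ≤ code.length ∧ code.take (wordAt M d).length = wordAt M d
      · exact absurd ⟨List.length_pos_iff.mpr h2.1, h2.2.1, h2.2.2⟩ h
      · rw [if_neg h2]

-- A's inner scan, under valid entries, decides 'some word equals code'
lemma scanA_eq (M : List (List String)) (code : List Char) :
    ∀ (D : List Int), (∀ d ∈ D, entryOK M d = true) →
      scanA M code D = some (decide (∃ d ∈ D, wordAt M d = code)) := by
  intro D
  induction D with
  | nil => intro _; simp [scanA]
  | cons d rest ih =>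
    intro hok
    obtain ⟨row, w, hrow, hw, hwl⟩ := entryOK_word (hok d (by simp))
    simp only [scanA, hrow, hw]
    simp only [hwl]
    by_cases hm : wordAt M d = code
    · rw [if_pos hm]
      simp [hm]
    · rw [if_neg hm, ih (fun d' hd' => hok d' (by simp [hd']))]
      congr 1
      simp [hm]

-- main invariant: for j ≤ len code0, A's shrinking loop at fuel j over code0.take j equals
-- the capped fold at cap j (with the None fall-through as -2)
lemma loopA_eq_bestF (M : List (List String)) (D : List Int) (code0 : List Char)
    (hok : ∀ d ∈ D, entryOK M d = true) :
    ∀ (j : Nat), j ≤ code0.length →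
      loopA M D j (code0.take j) =
        (if bestF M code0 j D 0 = 0 then -2 else bestF M code0 j D 0) := by
  intro j
  induction j with
  | zero => intro _; rw [bestF_zero]; simp [loopA]
  | succ j ih =>
    intro hj
    rw [loopA, scanA_eq M _ D hok]
    have hlen : (code0.take (j + 1)).length = j + 1 := by
      simp [List.length_take]; omega
    by_cases hex : ∃ d ∈ D, wordAt M d = code0.take (j + 1)
    · rw [decide_eq_true hex]
      simp only
      have hhit : ∃ d ∈ D, wordAt M d ≠ [] ∧ (wordAt M d).length = j + 1 ∧
          code0.take (wordAt M d).length = wordAt M d := by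
        obtain ⟨d, hd, heq⟩ := hex
        refine ⟨d, hd, ?_, ?_, ?_⟩
        · rw [heq]; intro h; rw [h] at hlen; simp at hlen
        · rw [heq, hlen]
        · rw [heq, hlen]
      rw [bestF_cap_hit M code0 j D 0 (by omega) hhit]
      rw [if_neg (by omega)]
    · rw [decide_eq_false hex]
      simp only
      have hdrop : (code0.take (j + 1)).dropLast = code0.take j := by
        rw [List.dropLast_eq_take, hlen]
        simp [List.take_take]
      have hno : ∀ d ∈ D, ¬ (wordAt M d ≠ [] ∧ (wordAt M d).length = j + 1 ∧
          code0.take (wordAt M d).length = wordAt M d) := by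
        rintro d hd ⟨_, hl, hp⟩
        exact hex ⟨d, hd, by rw [← hp, hl]⟩
      rw [hdrop, ih (by omega), bestF_cap_drop M code0 j D 0 hno]

-- A builds exactly codeOf message (case analysis on the first four characters)
lemma codeA_eq (s : List Char) (hne : s ≠ []) :
    (if 4 < s.length then
      (PySem.List.pyRange 1 3 1).foldl (fun c i => c ++ (PySem.List.pyGet? s i).toList)
        (PySem.List.pyGet? s 0).toList
     else if 1 < s.length then
      (PySem.List.pyRange 1 ((s.length : Int) - 1) 1).foldl
        (fun c i => c ++ (PySem.List.pyGet? s i).toList) (PySem.List.pyGet? s 0).toList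
     else (PySem.List.pyGet? s 0).toList)
    = s.take (max 1 (min s.length 4 - 1)) := by
  match s with
  | [] => exact absurd rfl hne
  | [a] => norm_num [PySem.List.pyGet?, PySem.List.pyIdx?]
  | [a, b] =>
    rw [if_neg (by norm_num), if_pos (by norm_num),
        (by norm_num : ((([a,b]:List Char).length : Int) - 1) = 1),
        (by decide : PySem.List.pyRange 1 (1:Int) 1 = [])]
    norm_num [PySem.List.pyGet?, PySem.List.pyIdx?]
  | [a, b, c] =>
    rw [if_neg (by norm_num), if_pos (by norm_num),
        (by norm_num : ((([a,b,c]:List Char).length : Int) - 1) = 2),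
        (by decide : PySem.List.pyRange 1 (2:Int) 1 = [1])]
    norm_num [PySem.List.pyGet?, PySem.List.pyIdx?, Int.toNat]
  | [a, b, c, d] =>
    rw [if_neg (by norm_num), if_pos (by norm_num),
        (by norm_num : ((([a,b,c,d]:List Char).length : Int) - 1) = 3),
        (by decide : PySem.List.pyRange 1 (3:Int) 1 = [1, 2])]
    norm_num [PySem.List.pyGet?, PySem.List.pyIdx?, Int.toNat]
  | a :: b :: c :: d :: e :: rest =>
    have h4 : 4 < (a :: b :: c :: d :: e :: rest).length := by simp
    rw [if_pos h4, (by decide : PySem.List.pyRange 1 (3:Int) 1 = [1, 2])]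
    have h0 : (0:Int) ≤ ↑rest.length + 1 + 1 + 1 + 1 := by positivity
    have h1 : (0:Int) ≤ ↑rest.length + 1 + 1 + 1 := by positivity
    have h2 : (2:Int) ≤ ↑rest.length + 1 + 1 + 1 + 1 := by omega
    simp [List.foldl, PySem.List.pyGet?, PySem.List.pyIdx?, h0, h1, h2]

-- A, on a nonempty message, is the shrinking loop started at the capped prefix
lemma A_as_loop (M : List (List String)) (D : List Int) (message : String)
    (hne : message.toList ≠ []) :
    length_of_the_longest_letter M D message =
      loopA M D (codeOf message).length (codeOf message) := by
  have hcode := codeA_eq message.toList hne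
  have h1 : ¬ message.toList.length < 1 := by
    have := List.length_pos_iff.mpr hne; omega
  unfold length_of_the_longest_letter
  by_cases h4 : 4 < message.toList.length
  · rw [if_pos h4] at hcode
    simp only [if_pos h4]
    rw [hcode]; rfl
  · rw [if_neg h4] at hcode
    simp only [if_neg h4, if_neg h1]
    by_cases h2 : 1 < message.toList.length
    · rw [if_pos h2] at hcode
      simp only [if_pos h2]
      rw [hcode]; rfl
    · rw [if_neg h2] at hcode
      simp only [if_neg h2]
      rw [hcode]; rfl

-- B, on a nonempty message, is the single pass over the capped prefix
lemma B_as_loop (M : List (List String)) (D : List Int) (message : String)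
    (hne : message.toList ≠ []) :
    length_of_the_longest_letter_alt M D message =
      (match loopB M (codeOf message) D 0 with
       | none => -3
       | some best => if best ≠ 0 then best else -2) := by
  have h1 : ¬ message.toList.length < 1 := by
    have := List.length_pos_iff.mpr hne; omega
  unfold length_of_the_longest_letter_alt
  simp only [if_neg h1]
  rfl

lemma codeOf_ne (message : String) (hne : message.toList ≠ []) : codeOf message ≠ [] := by
  unfold codeOf
  have := List.length_pos_iff.mpr hne
  intro h
  have h2 := congrArg List.length h
  simp only [List.length_nil, List.length_take, Nat.min_def, Nat.max_def] at h2
  split_ifs at h2 <;> omega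

-- ===== VERDICT (by name: the statement is the Claim_ definition above) =====
theorem length_of_the_longest_letter_spec : Claim_equal_length_of_the_longest_letter := by
  intro M D message hdom hpre
  unfold Spec_length_of_the_longest_letter
  by_cases hmt : message.toList = []
  · have h0 : message.toList.length = 0 := by rw [hmt]; rfl
    simp [length_of_the_longest_letter, length_of_the_longest_letter_alt, h0]
  · rw [A_as_loop M D message hmt, B_as_loop M D message hmt]
    have hcne := codeOf_ne message hmt
    obtain ⟨m, hm⟩ : ∃ m, (codeOf message).length = m + 1 := by
      cases h : (codeOf message).length with
      | zero => exact absurd (List.eq_nil_of_length_eq_zero h) hcne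
      | succ m => exact ⟨m, rfl⟩
    rcases hpre with hempty | hfull | ⟨hok, _⟩
    · exact absurd hempty hmt
    · -- an early full-code match: A's first pass and B both return len(code)
      obtain ⟨hscan, hloopB⟩ := early_match M (codeOf message) D 0 hfull
      rw [hm, loopA, hscan, hloopB]
      simp only [hm]
      have : ((m : Int) + 1) ≠ 0 := by omega
      rw [if_pos (by push_cast; omega)]
      push_cast
      ring
    · -- every entry well-formed
      by_cases hex : ∃ d ∈ D, wordAt M d = codeOf message
      · -- a full-code match somewhere: build the prefix-OK witness and reuse early_match
        obtain ⟨d, hd, heq⟩ := hex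
        obtain ⟨i, hi, hget⟩ := List.mem_iff_getElem.mp hd
        have hw : ∃ i, ∃ _ : i < D.length,
            (∀ k, k ≤ i → entryOK M (D.getD k 0) = true) ∧
            wordAt M (D.getD i 0) = codeOf message := by
          refine ⟨i, hi, ?_, ?_⟩
          · intro k hk
            have hkl : k < D.length := by omega
            rw [List.getD_eq_getElem D 0 hkl]
            exact hok _ (List.getElem_mem hkl)
          · rw [List.getD_eq_getElem D 0 hi, hget, heq]
        obtain ⟨hscan, hloopB⟩ := early_match M (codeOf message) D 0 hw
        rw [hm, loopA, hscan, hloopB]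
        simp only [hm]
        rw [if_pos (by push_cast; omega)]
        push_cast
        ring
      · -- no full-code match: both sides are the capped fold
        have hno : ∀ d ∈ D, wordAt M d ≠ codeOf message := by
          intro d hd h; exact hex ⟨d, hd, h⟩
        rw [loopB_eq_bestF M (codeOf message) D 0 hok hno]
        have hA := loopA_eq_bestF M D (codeOf message) hok (codeOf message).length le_rfl
        rw [List.take_length] at hA
        rw [hA]
        by_cases hz : bestF M (codeOf message) (codeOf message).length D 0 = 0
        · simp [hz]
        · simp [hz]
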